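-- pv_equiv track=rewrite | github.com/Lanqilu/PAT | 0_03_我要通过.py | check
-- ===== SOURCE A (Python) =====
-- def check(string: str):
--     a = ["P", "A", "T"]
--     if string.count("P") != 1 or string.count("T") != 1:
--         return False
--     if string.index("T") < string.index("P"):
--         return False
--     if string.count("A") < 1:
--         return False
--     for i in string:
--         if i not in a:
--             return False
--     s_lst = string.split("P")
--     s_lst = s_lst[0:1]+s_lst[1].split("T")
--     if len(s_lst[0])*len(s_lst[1]) == len(s_lst[2]) and len(s_lst[1]) != 0:
--         return True
--     else:
--         return False
-- ===== SOURCE B (Python) =====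
-- def _spanA(s, i):
--     # index just past the run of 'A's starting at i
--     while i < len(s) and s[i] == 'A':
--         i += 1
--     return i
--
-- def check(string: str):
--     # single left-to-right parse of the shape  A^a P A^b T A^c  with b >= 1 and a*b == c
--     n = len(string)
--     a = _spanA(string, 0)
--     if a == n or string[a] != 'P':
--         return False
--     m = _spanA(string, a + 1)
--     b = m - (a + 1)
--     if b == 0:
--         return False
--     if m == n or string[m] != 'T':
--         return False
--     e = _spanA(string, m + 1)
--     return e == n and a * b == n - (m + 1)
-- ===== Notes on version B (the rewrite author's own statement) =====
-- stated objective: simpler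
-- what changed: Replaces A's multi-pass validation (three substring counts, two index lookups, an alphabet loop and two splits) by a single left-to-right parse of the shape A^a P A^b T A^c that checks b>=1 and a*b==c.
import Mathlib
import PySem

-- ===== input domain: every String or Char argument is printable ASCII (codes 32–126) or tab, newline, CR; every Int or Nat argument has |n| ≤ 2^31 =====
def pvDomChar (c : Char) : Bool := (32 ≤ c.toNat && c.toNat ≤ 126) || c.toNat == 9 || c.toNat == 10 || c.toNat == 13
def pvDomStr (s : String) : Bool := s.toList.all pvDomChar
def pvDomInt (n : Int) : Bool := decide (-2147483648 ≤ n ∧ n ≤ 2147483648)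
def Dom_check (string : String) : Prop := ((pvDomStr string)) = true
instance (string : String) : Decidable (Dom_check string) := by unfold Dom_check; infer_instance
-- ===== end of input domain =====

-- B replaces A's multi-pass count/index/split validation by one left-to-right parse of the
-- shape A^a P A^b T A^c (objective: simpler single pass).

-- B replaces A's multi-pass validation (substring counts, index lookups, an alphabet loop
-- and two splits) by one left-to-right parse of the shape A^a P A^b T A^c (objective: simpler).

-- ===== PORT A =====
-- split results stay List (List Char) (Python list[str]); the guaranteed-in-range s_lst[k]
-- is ported as getD k [] (only reached when in range, see the count guards); string.index is
-- ported via PySem.Str.find, exact here because the count guards ensure the char occurs.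
def check (string : String) : Bool :=
  let a : List Char := ['P', 'A', 'T']
  if PySem.Str.count string "P" ≠ 1 || PySem.Str.count string "T" ≠ 1 then false
  else if PySem.Str.find string "T" < PySem.Str.find string "P" then false
  else if PySem.Str.count string "A" < 1 then false
  else if ¬ (string.toList.all (fun i => a.contains i)) then false
  else
    let s_lst := PySem.Chars.splitOn string.toList "P".toList
    let s_lst := PySem.List.slice s_lst (some 0) (some 1) ++
                 PySem.Chars.splitOn (s_lst.getD 1 []) "T".toList
    if (s_lst.getD 0 []).length * (s_lst.getD 1 []).length = (s_lst.getD 2 []).length ∧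
       (s_lst.getD 1 []).length ≠ 0 then true
    else false

-- ===== PORT B =====
def spanA : List Char → Nat
  | [] => 0
  | c :: t => if c = 'A' then spanA t + 1 else 0

def check_alt (string : String) : Bool :=
  let cs := string.toList
  let a := spanA cs
  match cs.drop a with
  | [] => false                               -- a == n
  | x :: r1 =>
    if x ≠ 'P' then false                     -- cs[a] != 'P'
    else
      let b := spanA r1
      if b = 0 then false
      else
        match r1.drop b with
        | [] => false                         -- m == n
        | y :: r2 =>
          if y ≠ 'T' then false               -- cs[m] != 'T'
          else (spanA r2 == r2.length) && (a * b == r2.length)   -- e == n and a*b == n-(m+1)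

-- ===== PRECONDITION & SPEC =====
def Spec_check (string : String) (out : Bool) : Prop := out = check_alt string
instance (string : String) (out : Bool) : Decidable (Spec_check string out) := by unfold Spec_check; infer_instance

-- ===== CLAIM (what is proved, stated in full; the proofs are below) =====
def Claim_equal_check : Prop := ∀ (string : String), Dom_check string → Spec_check string (check string)

-- ===== LEMMAS AND PROOFS =====
theorem spanA_rep_append (a : Nat) (l : List Char) :
    spanA (List.replicate a 'A' ++ l) = a + spanA l := by
  induction a with
  | zero => simp
  | succ n ih => simpa [List.replicate_succ, spanA, ih] using by omega

theorem spanA_cons_ne (c : Char) (t : List Char) (h : c ≠ 'A') : spanA (c :: t) = 0 := by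
  simp [spanA, h]

theorem take_drop_spanA (cs : List Char) :
    cs = List.replicate (spanA cs) 'A' ++ cs.drop (spanA cs) := by
  induction cs with
  | nil => rfl
  | cons c t ih =>
    by_cases h : c = 'A'
    · subst h; simp only [spanA, if_pos rfl, List.replicate_succ, List.cons_append,
        List.drop_succ_cons]
      exact congrArg _ ih
    · simp [spanA, h]

theorem eq_rep_of_spanA_eq_length (l : List Char) (h : spanA l = l.length) :
    l = List.replicate l.length 'A' := by
  conv_lhs => rw [take_drop_spanA l]
  rw [h]; simp

theorem countGo_single (x : Char) : ∀ (fuel : Nat) (l : List Char) (acc : Nat),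
    l.length ≤ fuel → PySem.Chars.count.go [x] fuel l acc = acc + l.count x := by
  intro fuel
  induction fuel with
  | zero =>
    intro l acc hl
    have : l = [] := List.eq_nil_of_length_eq_zero (by omega)
    subst this
    rw [PySem.Chars.count.go.eq_def]; simp
  | succ n ih =>
    intro l acc hl
    cases l with
    | nil => rw [PySem.Chars.count.go.eq_def]; simp
    | cons c t =>
      rw [PySem.Chars.count.go.eq_def]
      simp only [List.isPrefixOf, List.isPrefixOf_nil_left, Bool.and_true, List.length_cons] at *
      by_cases hc : x = c
      · subst hc
        rw [if_pos (by simp), show List.drop (List.length ([] : List Char) + 1) (x :: t) = t from rfl, ih t (acc + 1) (by omega)]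
        simp [List.count_cons]
        omega
      · rw [if_neg (by simpa using hc), ih t acc (by omega)]
        simp [List.count_cons, hc]
        intro h; exact absurd h.symm hc

theorem count_single (l : List Char) (x : Char) :
    PySem.Chars.count l [x] = l.count x := by
  unfold PySem.Chars.count
  rw [if_neg (by simp), countGo_single x l.length l 0 le_rfl]
  simp

theorem findGo_single (x : Char) : ∀ (l : List Char) (k : Nat),
    PySem.Chars.find.go [x] l k = if x ∈ l then ((k : Int) + l.idxOf x) else -1 := by
  intro l
  induction l with
  | nil => intro k; rw [PySem.Chars.find.go.eq_def]; simp
  | cons c t ih =>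
    intro k
    rw [PySem.Chars.find.go.eq_def]
    simp only [List.isPrefixOf, List.isPrefixOf_nil_left, Bool.and_true]
    by_cases hc : x = c
    · subst hc
      simp [List.idxOf_cons_self]
    · rw [if_neg (by simpa using hc), ih (k + 1)]
      have hidx : List.idxOf x (c :: t) = List.idxOf x t + 1 :=
        List.idxOf_cons_ne t (fun h => hc h.symm)
      by_cases hm : x ∈ t
      · rw [if_pos hm, if_pos (List.mem_cons_of_mem _ hm), hidx]
        push_cast; ring
      · rw [if_neg hm, if_neg (by simp [hm, hc])]

theorem find_single (l : List Char) (x : Char) :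
    PySem.Chars.find l [x] = if x ∈ l then (l.idxOf x : Int) else -1 := by
  unfold PySem.Chars.find
  rw [findGo_single x l 0]
  simp

theorem splitGo_single (x : Char) : ∀ (fuel : Nat) (l cur : List Char) (acc : List (List Char)),
    l.length ≤ fuel → PySem.Chars.splitOn.go [x] fuel l cur acc =
      acc.reverse ++ (List.splitOn x l).modifyHead (cur.reverse ++ ·) := by
  intro fuel
  induction fuel with
  | zero =>
    intro l cur acc hl
    have : l = [] := List.eq_nil_of_length_eq_zero (by omega)
    subst this
    rw [PySem.Chars.splitOn.go.eq_def]
    simp [List.splitOn]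
  | succ n ih =>
    intro l cur acc hl
    cases l with
    | nil =>
      rw [PySem.Chars.splitOn.go.eq_def]
      simp [List.splitOn]
    | cons c t =>
      rw [PySem.Chars.splitOn.go.eq_def]
      simp only [List.isPrefixOf, List.isPrefixOf_nil_left, Bool.and_true, List.length_cons] at *
      by_cases hc : x = c
      · subst hc
        rw [if_pos (by simp), show List.drop (List.length ([] : List Char) + 1) (x :: t) = t from rfl, ih t [] (cur.reverse :: acc) (by omega)]
        simp only [List.splitOn, List.splitOnP_cons, BEq.rfl, if_pos rfl]
        cases List.splitOnP (fun y => y == x) t <;> simp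
      · rw [if_neg (by simpa using hc), ih t (c :: cur) acc (by omega)]
        simp only [List.splitOn, List.splitOnP_cons]
        rw [if_neg (by simpa using fun h => hc (by simpa using h.symm))]
        obtain ⟨p, ps, hps⟩ := List.exists_cons_of_ne_nil (List.splitOnP_ne_nil (· == x) t)
        rw [hps]
        simp

theorem split_single (l : List Char) (x : Char) :
    PySem.Chars.splitOn l [x] = List.splitOn x l := by
  unfold PySem.Chars.splitOn
  rw [splitGo_single x (l.length + 1) l [] [] (by omega)]
  obtain ⟨p, ps, hps⟩ := List.exists_cons_of_ne_nil (List.splitOnP_ne_nil (· == x) l)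
  simp only [List.splitOn] at *
  rw [hps]
  simp

theorem splitOn_of_not_mem (x : Char) (l : List Char) (h : x ∉ l) :
    List.splitOn x l = [l] :=
  List.splitOnP_eq_single _ _ (by intro a ha; simp; rintro rfl; exact h ha)

theorem splitOn_first (x : Char) (u v : List Char) (h : x ∉ u) :
    List.splitOn x (u ++ x :: v) = u :: List.splitOn x v :=
  List.splitOnP_first _ _ (by intro a ha; simp; rintro rfl; exact h ha) _ (by simp) _

theorem first_occ {x : Char} {l : List Char} (h : x ∈ l) :
    ∃ u v, l = u ++ x :: v ∧ x ∉ u := by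
  induction l with
  | nil => cases h
  | cons c t ih =>
    by_cases hc : c = x
    · exact ⟨[], t, by simp [hc], by simp⟩
    · obtain ⟨u, v, huv, hu⟩ := ih (by
        rcases List.mem_cons.mp h with h | h
        · exact absurd h.symm hc
        · exact h)
      exact ⟨c :: u, v, by rw [huv]; rfl, by
        simp only [List.mem_cons, not_or]
        exact ⟨fun h' => hc h'.symm, hu⟩⟩

theorem check_alt_iff (s : String) :
    check_alt s = true ↔ ∃ a b c : Nat,
      s.toList = List.replicate a 'A' ++ 'P' :: (List.replicate b 'A' ++ 'T' :: List.replicate c 'A')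
      ∧ 1 ≤ b ∧ a * b = c := by
  constructor
  · intro h
    unfold check_alt at h
    dsimp only [] at h
    split at h
    · simp at h
    case _ x r1 heq1 =>
      split at h
      · simp at h
      case _ hx =>
        rw [not_not] at hx
        subst hx
        split at h
        · simp at h
        case _ hb0 =>
          split at h
          · simp at h
          case _ y r2 heq2 =>
            split at h
            · simp at h
            case _ hy =>
              rw [not_not] at hy
              subst hy
              simp only [Bool.and_eq_true, beq_iff_eq] at h
              obtain ⟨hspan, hab⟩ := h
              refine ⟨spanA s.toList, spanA r1, r2.length, ?_, by omega, hab⟩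
              have h1 := take_drop_spanA s.toList
              have h2 := take_drop_spanA r1
              rw [heq1] at h1
              rw [heq2] at h2
              conv_lhs => rw [h1, h2, eq_rep_of_spanA_eq_length r2 hspan]
  · rintro ⟨a, b, c, hs, hb, habc⟩
    unfold check_alt
    dsimp only []
    rw [hs, spanA_rep_append, spanA_cons_ne 'P' _ (by decide), Nat.add_zero,
      List.drop_left' (by simp)]
    have h1 : spanA (List.replicate b 'A' ++ 'T' :: List.replicate c 'A') = b := by
      rw [spanA_rep_append, spanA_cons_ne 'T' _ (by decide)]
      omega
    simp only [h1, List.drop_left' (show (List.replicate b 'A').length = b by simp)]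
    rw [if_neg (by decide), if_neg (by omega), if_neg (by decide)]
    have h2 : spanA (List.replicate c 'A') = c := by
      simpa using spanA_rep_append c []
    simp [h2, habc]

theorem check_iff (s : String) :
    check s = true ↔ ∃ a b c : Nat,
      s.toList = List.replicate a 'A' ++ 'P' :: (List.replicate b 'A' ++ 'T' :: List.replicate c 'A')
      ∧ 1 ≤ b ∧ a * b = c := by
  unfold check PySem.Str.count PySem.Str.find
  dsimp only []
  rw [show ("P".toList) = ['P'] from rfl, show ("T".toList) = ['T'] from rfl,
    show ("A".toList) = ['A'] from rfl,
    count_single, count_single, count_single, find_single, find_single, split_single]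
  constructor
  · intro h
    by_cases hP : List.count 'P' s.toList = 1
    swap
    · rw [if_pos (by simp [hP])] at h; simp at h
    by_cases hT : List.count 'T' s.toList = 1
    swap
    · rw [if_pos (by simp [hT])] at h; simp at h
    rw [if_neg (by simp [hP, hT])] at h
    have hPmem : 'P' ∈ s.toList := List.count_pos_iff.mp (by omega)
    have hTmem : 'T' ∈ s.toList := List.count_pos_iff.mp (by omega)
    rw [if_pos hTmem, if_pos hPmem] at h
    by_cases hord : (List.idxOf 'T' s.toList : Int) < (List.idxOf 'P' s.toList : Int)
    · rw [if_pos hord] at h; simp at h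
    rw [if_neg hord] at h
    by_cases hA : List.count 'A' s.toList < 1
    · rw [if_pos hA] at h; simp at h
    rw [if_neg hA] at h
    by_cases hall : s.toList.all (fun i => List.contains ['P', 'A', 'T'] i) = true
    swap
    · rw [if_pos hall] at h; simp at h
    rw [if_neg (not_not_intro hall)] at h
    -- decompose the string at the unique 'P' and the unique 'T'
    obtain ⟨u, v, huv, hu⟩ := first_occ hPmem
    have hPv : 'P' ∉ v := by
      rw [huv, List.count_append, List.count_cons_self] at hP
      have : List.count 'P' v = 0 := by
        have := List.count_eq_zero.mpr hu
        omega
      exact List.count_eq_zero.mp this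
    have hidxP : List.idxOf 'P' s.toList = u.length := by
      rw [huv, List.idxOf_append_of_notMem hu, List.idxOf_cons_self]
      omega
    have hTu : 'T' ∉ u := by
      intro hmem
      have h1 : List.idxOf 'T' s.toList = List.idxOf 'T' u := by
        rw [huv]; exact List.idxOf_append_of_mem hmem
      have h2 : List.idxOf 'T' u < u.length := List.idxOf_lt_length_of_mem hmem
      rw [hidxP, h1] at hord
      exact hord (by exact_mod_cast h2)
    have hTv : 'T' ∈ v := by
      rw [huv] at hTmem
      rcases List.mem_append.mp hTmem with h' | h'
      · exact absurd h' hTu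
      · rcases List.mem_cons.mp h' with h' | h'
        · exact absurd h' (by decide)
        · exact h'
    obtain ⟨m, w, hvw, hm⟩ := first_occ hTv
    have hTw : 'T' ∉ w := by
      rw [huv, hvw, List.count_append, List.count_cons] at hT
      simp only [List.count_append, List.count_cons_self] at hT
      have hcu : List.count 'T' u = 0 := List.count_eq_zero.mpr hTu
      have hcm : List.count 'T' m = 0 := List.count_eq_zero.mpr hm
      have : List.count 'T' w = 0 := by
        revert hT; rw [hcu, hcm]; intro hT; omega
      exact List.count_eq_zero.mp this
    have hPm : 'P' ∉ m := by
      intro hmem; apply hPv; rw [hvw]; exact List.mem_append_left _ hmem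
    have hPw : 'P' ∉ w := by
      intro hmem; apply hPv; rw [hvw]
      exact List.mem_append_right _ (List.mem_cons_of_mem _ hmem)
    -- every character is in the alphabet, so u, m, w consist of 'A's
    have repOf : ∀ l : List Char, (∀ y ∈ l, y ∈ s.toList) → 'P' ∉ l → 'T' ∉ l →
        l = List.replicate l.length 'A' := by
      intro l hsub hp ht
      apply List.eq_replicate_of_mem
      intro b hb
      have hmem : b ∈ (['P', 'A', 'T'] : List Char) := by
        have := List.all_eq_true.mp hall b (hsub b hb)
        simpa using this
      simp only [List.mem_cons, List.not_mem_nil, or_false] at hmem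
      rcases hmem with rfl | rfl | rfl
      · exact absurd hb hp
      · rfl
      · exact absurd hb ht
    have hurep := repOf u (fun y hy => huv ▸ List.mem_append_left _ hy) hu hTu
    have hmrep := repOf m (fun y hy => by
      rw [huv, hvw]; exact List.mem_append_right _ (List.mem_cons_of_mem _ (List.mem_append_left _ hy))) hPm hm
    have hwrep := repOf w (fun y hy => by
      rw [huv, hvw]
      exact List.mem_append_right _ (List.mem_cons_of_mem _ (List.mem_append_right _ (List.mem_cons_of_mem _ hy)))) hPw hTw
    -- evaluate the split pipeline
    rw [huv, hvw, splitOn_first 'P' u _ hu] at h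
    rw [splitOn_of_not_mem 'P' _ (by
      simp only [List.mem_append, List.mem_cons, not_or]
      exact ⟨hPm, by decide, hPw⟩)] at h
    simp only [List.getD_cons_succ, List.getD_cons_zero] at h
    rw [split_single, splitOn_first 'T' m w hm, splitOn_of_not_mem 'T' w hTw] at h
    have hsl : ∀ z : List Char, PySem.List.slice ([u, z] : List (List Char)) (some 0) (some 1) = [u] := by
      intro z; simp [PySem.List.slice, PySem.List.clampIdx]
    rw [hsl] at h
    simp only [List.cons_append, List.nil_append,
      List.getD_cons_succ, List.getD_cons_zero] at h
    split at h
    case _ hfin =>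
      refine ⟨u.length, m.length, w.length, ?_, ?_, hfin.1⟩
      · rw [huv, hvw]
        conv_lhs => rw [hurep, hmrep, hwrep]
      · have := hfin.2
        omega
    · simp at h
  · rintro ⟨a, b, c, hs, hb, habc⟩
    rw [hs]
    have hPa : 'P' ∉ List.replicate a 'A' := by simp [List.mem_replicate]
    have hPb : 'P' ∉ List.replicate b 'A' := by simp [List.mem_replicate]
    have hTa : 'T' ∉ List.replicate a 'A' := by simp [List.mem_replicate]
    have hTb : 'T' ∉ List.replicate b 'A' := by simp [List.mem_replicate]
    have hPv : 'P' ∉ List.replicate b 'A' ++ 'T' :: List.replicate c 'A' := by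
      simp [List.mem_replicate]
    have hTw : 'T' ∉ List.replicate c 'A' := by simp [List.mem_replicate]
    have hPmem : 'P' ∈ List.replicate a 'A' ++ 'P' :: (List.replicate b 'A' ++ 'T' :: List.replicate c 'A') := by simp
    have hTmem : 'T' ∈ List.replicate a 'A' ++ 'P' :: (List.replicate b 'A' ++ 'T' :: List.replicate c 'A') := by simp
    have hcP : List.count 'P' (List.replicate a 'A' ++ 'P' :: (List.replicate b 'A' ++ 'T' :: List.replicate c 'A')) = 1 := by
      simp [List.count_append, List.count_cons, List.count_replicate]
    have hcT : List.count 'T' (List.replicate a 'A' ++ 'P' :: (List.replicate b 'A' ++ 'T' :: List.replicate c 'A')) = 1 := by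
      simp [List.count_append, List.count_cons, List.count_replicate]
    have hidxP : List.idxOf 'P' (List.replicate a 'A' ++ 'P' :: (List.replicate b 'A' ++ 'T' :: List.replicate c 'A')) = a := by
      rw [List.idxOf_append_of_notMem hPa, List.idxOf_cons_self]
      simp
    have hidxT : List.idxOf 'T' (List.replicate a 'A' ++ 'P' :: (List.replicate b 'A' ++ 'T' :: List.replicate c 'A')) = a + b + 1 := by
      rw [List.idxOf_append_of_notMem hTa, List.idxOf_cons_ne _ (by decide),
        List.idxOf_append_of_notMem hTb, List.idxOf_cons_self]
      simp
      omega
    rw [if_neg (by simp [hcP, hcT]), if_pos hTmem, if_pos hPmem,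
      if_neg (by rw [hidxP, hidxT]; push_cast; omega),
      if_neg (by
        simp only [List.count_append, List.count_cons, List.count_replicate]
        simp
        omega),
      if_neg (not_not_intro (by
        simp only [List.all_eq_true]
        intro x hx
        simp only [List.mem_append, List.mem_replicate, List.mem_cons] at hx
        rcases hx with ⟨_, rfl⟩ | rfl | ⟨_, rfl⟩ | rfl | ⟨_, rfl⟩ <;> decide))]
    rw [splitOn_first 'P' _ _ hPa, splitOn_of_not_mem 'P' _ hPv]
    simp only [List.getD_cons_succ, List.getD_cons_zero]
    rw [split_single, splitOn_first 'T' _ _ hTb, splitOn_of_not_mem 'T' _ hTw]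
    have hsl : ∀ z : List Char, PySem.List.slice ([List.replicate a 'A', z] : List (List Char)) (some 0) (some 1) = [List.replicate a 'A'] := by
      intro z; simp [PySem.List.slice, PySem.List.clampIdx]
    rw [hsl]
    simp only [List.cons_append, List.nil_append, List.getD_cons_succ, List.getD_cons_zero]
    rw [if_pos (by
      constructor
      · simp [habc]
      · simp
        omega)]

-- ===== VERDICT (by name: the statement is the Claim_ definition above) =====
theorem check_spec : Claim_equal_check := by
  intro s _
  unfold Spec_check
  rw [Bool.eq_iff_iff, check_iff, check_alt_iff]
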